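-- pv_equiv track=rewrite | github.com/mindspore-lab/mindnlp | examples/mindtorch_v2/ascendc/ascend910a_extras/csrc/opdev/cmake/util/ascendc_impl_build.py | optype_snake_ex
-- ===== SOURCE A (Python) =====
-- def optype_snake_ex(s):
--     snake_case = ""
--     for i, c in enumerate(s):
--         if i == 0:
--             snake_case += c.lower()
--         elif c.isupper():
--             if s[i - 1] != "_":
--                 if not s[i - 1].isupper():
--                     snake_case += "_"
--                 elif s[i - 1].isupper() and (i + 1) < len(s) and s[i + 1].islower():
--                     snake_case += "_"
--             snake_case += c.lower()
--         else:
--             snake_case += c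
--     return snake_case
-- ===== SOURCE B (Python) =====
-- import re
--
-- _ACRONYM = re.compile(r'([A-Z])([A-Z][a-z])')   # upper, then upper+lower: acronym-to-word boundary
-- _BOUNDARY = re.compile(r'([^_A-Z])([A-Z])')     # non-underscore non-upper, then upper
--
-- def optype_snake_ex(s):
--     t = _ACRONYM.sub(r'\1_\2', s)
--     t = _BOUNDARY.sub(r'\1_\2', t)
--     return t.lower()
-- ===== Notes on version B (the rewrite author's own statement) =====
-- stated objective: idiomatic
-- what changed: Replaced the index-walking loop with neighbor checks by two regular-expression substitutions (acronym boundary, then lower/other-to-upper boundary) followed by str.lower(), as an experienced Python developer would write it.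
import Mathlib
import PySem

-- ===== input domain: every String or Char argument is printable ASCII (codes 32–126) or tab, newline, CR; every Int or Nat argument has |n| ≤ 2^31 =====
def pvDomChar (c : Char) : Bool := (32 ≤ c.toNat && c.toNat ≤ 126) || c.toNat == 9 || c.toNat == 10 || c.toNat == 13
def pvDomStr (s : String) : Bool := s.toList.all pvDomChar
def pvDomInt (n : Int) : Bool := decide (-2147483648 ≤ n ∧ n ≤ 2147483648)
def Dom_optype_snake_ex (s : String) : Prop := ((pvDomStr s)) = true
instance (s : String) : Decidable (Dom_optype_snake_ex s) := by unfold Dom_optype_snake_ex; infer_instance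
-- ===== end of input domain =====

-- B rewrites A's index-walking character loop as two regular-expression substitutions plus str.lower() (idiomatic; same behaviour on the ASCII domain).

-- ===== PORT A =====
-- Python's `for i, c in enumerate(s)` is ported as a foldl over the characters carrying the index
-- counter; `s[i-1]` / `s[i+1]` (only read at indices Python has in range) via PySem.List.pyGetD.
def pvStepA (cs : List Char) (st : List Char × Nat) (c : Char) : List Char × Nat :=
  let acc := st.1
  let i := st.2
  let acc :=
    if i = 0 then
      acc ++ [PySem.Chars.lowerChar c]
    else if PySem.Chars.isupper c then
      let prev := PySem.List.pyGetD cs ((i : Int) - 1) ' '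
      let acc :=
        if prev ≠ '_' then
          if !PySem.Chars.isupper prev then acc ++ ['_']
          else if PySem.Chars.isupper prev && decide (i + 1 < cs.length)
                  && PySem.Chars.islower (PySem.List.pyGetD cs ((i : Int) + 1) ' ') then
            acc ++ ['_']
          else acc
        else acc
      acc ++ [PySem.Chars.lowerChar c]
    else acc ++ [c]
  (acc, i + 1)

def optype_snake_ex (s : String) : String :=
  String.mk ((s.toList.foldl (pvStepA s.toList) ([], 0)).1)

-- ===== PORT B =====
-- re.sub(r'([A-Z])([A-Z][a-z])', r'\1_\2', ·) as a leftmost non-overlapping scan (exact for this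
-- fixed pattern: a 3-character window, the whole match is consumed, '_' inserted after group 1).
def pvAcronymSub : List Char → List Char
  | a :: b :: c :: rest =>
    if PySem.Chars.isupper a && PySem.Chars.isupper b && PySem.Chars.islower c then
      a :: '_' :: b :: c :: pvAcronymSub rest
    else a :: pvAcronymSub (b :: c :: rest)
  | xs => xs

-- re.sub(r'([^_A-Z])([A-Z])', r'\1_\2', ·) as a leftmost non-overlapping scan (exact for this
-- fixed pattern: a 2-character window, the whole match is consumed, '_' inserted between).
def pvBoundarySub : List Char → List Char
  | a :: b :: rest =>
    if (!PySem.Chars.isupper a && a != '_') && PySem.Chars.isupper b then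
      a :: '_' :: b :: pvBoundarySub rest
    else a :: pvBoundarySub (b :: rest)
  | xs => xs

def optype_snake_ex_alt (s : String) : String :=
  String.mk (PySem.Chars.lower (pvBoundarySub (pvAcronymSub s.toList)))

-- ===== PRECONDITION & SPEC =====
def Spec_optype_snake_ex (s : String) (out : String) : Prop := out = optype_snake_ex_alt s
instance (s : String) (out : String) : Decidable (Spec_optype_snake_ex s out) := by unfold Spec_optype_snake_ex; infer_instance

-- ===== CLAIM (what is proved, stated in full; the proofs are below) =====
def Claim_equal_optype_snake_ex : Prop := ∀ (s : String), Dom_optype_snake_ex s → Spec_optype_snake_ex s (optype_snake_ex s)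

-- ===== LEMMAS AND PROOFS =====

-- the first character of the tail, if any, is a lowercase letter
def pvHeadIsLower : List Char → Bool
  | r :: _ => PySem.Chars.islower r
  | [] => false

-- position-wise description of the underscore insertions shared by both programs: '_' goes before
-- an uppercase c whose predecessor p is not '_' and is not uppercase or is followed by a lowercase
def pvIns (p : Char) : List Char → List Char
  | [] => []
  | c :: rest =>
    (if PySem.Chars.isupper c && p != '_'
        && (!PySem.Chars.isupper p || pvHeadIsLower rest) then ['_'] else [])
      ++ c :: pvIns c rest

-- sliding-window (overlapping) variants of the two substitution scans
def pvAcr : List Char → List Char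
  | a :: b :: c :: rest =>
    (if PySem.Chars.isupper a && PySem.Chars.isupper b && PySem.Chars.islower c then [a, '_'] else [a])
      ++ pvAcr (b :: c :: rest)
  | xs => xs

def pvBnd : List Char → List Char
  | a :: b :: rest =>
    (if (!PySem.Chars.isupper a && a != '_') && PySem.Chars.isupper b then [a, '_'] else [a])
      ++ pvBnd (b :: rest)
  | xs => xs

theorem pv_not_upper_of_lower {c : Char} (h : PySem.Chars.islower c = true) :
    PySem.Chars.isupper c = false := by
  simp [PySem.Chars.islower, Char.le_def, UInt32.le_iff_toNat_le] at h
  simp [PySem.Chars.isupper, Char.le_def, UInt32.le_iff_toNat_le]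
  omega

theorem pv_ne_underscore_of_upper {c : Char} (h : PySem.Chars.isupper c = true) :
    c ≠ '_' := by
  rintro rfl; simp [PySem.Chars.isupper, Char.le_def] at h

theorem pv_lowerChar_underscore : PySem.Chars.lowerChar '_' = '_' := by decide

theorem pv_lowerChar_of_not_upper {c : Char} (h : PySem.Chars.isupper c = false) :
    PySem.Chars.lowerChar c = c := by
  simp [PySem.Chars.lowerChar, h]

theorem pv_acr_lower_head {m : Char} (hm : PySem.Chars.islower m = true) (t : List Char) :
    pvAcr (m :: t) = m :: pvAcr t := by
  cases t with
  | nil => rfl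
  | cons b u => cases u with
    | nil => rfl
    | cons c rest => rw [pvAcr]; simp [pv_not_upper_of_lower hm]

theorem pv_acr_snd_lower {c : Char} (hc : PySem.Chars.islower c = true) (b : Char) (t : List Char) :
    pvAcr (b :: c :: t) = b :: c :: pvAcr t := by
  cases t with
  | nil => rfl
  | cons r rs =>
    rw [pvAcr]
    simp [pv_not_upper_of_lower hc, pv_acr_lower_head hc]

theorem pv_bnd_upper_head {b : Char} (hb : PySem.Chars.isupper b = true) (t : List Char) :
    pvBnd (b :: t) = b :: pvBnd t := by
  cases t with
  | nil => rfl
  | cons r rs => rw [pvBnd]; simp [hb]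

theorem pv_bnd_underscore (t : List Char) : pvBnd ('_' :: t) = '_' :: pvBnd t := by
  cases t with
  | nil => rfl
  | cons r rs => rw [pvBnd]; simp

-- after a match the skipped windows cannot match again, so the non-overlapping
-- substitution scans equal their sliding-window variants
theorem pv_acr_eq : ∀ cs : List Char, pvAcronymSub cs = pvAcr cs := by
  intro cs
  fun_induction pvAcronymSub cs with
  | case1 a b c rest h ih =>
    simp only [Bool.and_eq_true] at h
    obtain ⟨⟨ha, hb⟩, hc⟩ := h
    rw [pvAcr]
    simp only [ha, hb, hc, Bool.and_self, if_pos]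
    rw [pv_acr_snd_lower hc, ih]
    rfl
  | case2 a b c rest h ih => rw [ih, pvAcr]; split <;> simp_all
  | case3 xs h =>
    cases xs with
    | nil => rfl
    | cons a t => cases t with
      | nil => rfl
      | cons b u => cases u with
        | nil => rfl
        | cons c rest => exact absurd rfl (h a b c rest)

theorem pv_bnd_eq : ∀ cs : List Char, pvBoundarySub cs = pvBnd cs := by
  intro cs
  fun_induction pvBoundarySub cs with
  | case1 a b rest h ih =>
    simp only [Bool.and_eq_true] at h
    obtain ⟨ha, hb⟩ := h
    rw [pvBnd]
    simp only [ha, hb, Bool.and_self, if_pos]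
    rw [pv_bnd_upper_head hb, ih]
    rfl
  | case2 a b rest h ih => rw [ih, pvBnd]; split <;> simp_all
  | case3 xs h =>
    cases xs with
    | nil => rfl
    | cons a t => cases t with
      | nil => rfl
      | cons b u => exact absurd rfl (h a b u)

theorem pv_acr_head (a : Char) (t : List Char) : ∃ X, pvAcr (a :: t) = a :: X := by
  cases t with
  | nil => exact ⟨[], rfl⟩
  | cons b u => cases u with
    | nil => exact ⟨[b], rfl⟩
    | cons c rest =>
      rw [pvAcr]
      split <;> exact ⟨_, rfl⟩

-- the composition of the two sliding-window scans performs exactly the position-wise insertions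
theorem pv_main_aux (n : Nat) : ∀ (cs : List Char) (p : Char), cs.length ≤ n →
    pvBnd (pvAcr (p :: cs)) = p :: pvIns p cs := by
  induction n with
  | zero =>
    intro cs p h
    have : cs = [] := List.eq_nil_of_length_eq_zero (Nat.le_zero.mp h)
    subst this; rfl
  | succ n ih =>
    intro cs p h
    match cs with
    | [] => rfl
    | [c] =>
      show pvBnd (pvAcr [p, c]) = p :: pvIns p [c]
      rw [show pvAcr [p, c] = [p, c] from rfl]
      rw [show pvBnd [p, c]
            = (if (!PySem.Chars.isupper p && p != '_') && PySem.Chars.isupper c then [p, '_'] else [p])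
              ++ pvBnd [c] from rfl]
      by_cases hpu : p = '_' <;>
        cases hp : PySem.Chars.isupper p <;> cases hc : PySem.Chars.isupper c <;>
        simp_all [pvIns, pvHeadIsLower, pvBnd]
    | c :: d :: rest =>
      have hlen : (d :: rest).length ≤ n := by
        simp at h ⊢; omega
      obtain ⟨X, hX⟩ := pv_acr_head c (d :: rest)
      have hIH : pvBnd (c :: X) = c :: pvIns c (d :: rest) := by
        rw [← hX]; exact ih (d :: rest) c hlen
      by_cases h1 : (PySem.Chars.isupper p && PySem.Chars.isupper c && PySem.Chars.islower d) = true
      · -- the acronym window matches at (p, c, d)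
        simp only [Bool.and_eq_true] at h1
        obtain ⟨⟨hp, hc⟩, hd⟩ := h1
        rw [pvAcr]
        simp only [hp, hc, hd, Bool.and_self, if_pos]
        rw [hX, show ([p, '_'] ++ c :: X) = p :: '_' :: c :: X from rfl]
        rw [pv_bnd_upper_head hp, pv_bnd_underscore, hIH]
        have hpu : p ≠ '_' := pv_ne_underscore_of_upper hp
        simp [pvIns, pvHeadIsLower, hp, hc, hd, hpu]
      · -- no acronym match at (p, c, d)
        rw [pvAcr]
        rw [if_neg (by simpa using h1)]
        rw [hX, show ([p] ++ c :: X) = p :: c :: X from rfl]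
        rw [pvBnd, hIH]
        by_cases hpu : p = '_' <;>
          cases hp : PySem.Chars.isupper p <;> cases hc : PySem.Chars.isupper c <;>
          cases hd : PySem.Chars.islower d <;>
          simp_all [pvIns, pvHeadIsLower]

theorem pv_main (cs : List Char) (p : Char) :
    pvBnd (pvAcr (p :: cs)) = p :: pvIns p cs :=
  pv_main_aux cs.length cs p le_rfl

-- A's loop, from index i ≥ 1 on, appends exactly the lowercased position-wise insertions
theorem pv_loop (cs : List Char) : ∀ (u : List Char) (i : Nat) (p : Char) (acc : List Char),
    1 ≤ i → cs.drop (i - 1) = p :: u →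
    u.foldl (pvStepA cs) (acc, i)
      = (acc ++ (pvIns p u).map PySem.Chars.lowerChar, i + u.length) := by
  intro u
  induction u with
  | nil => intro i p acc hi hdrop; simp [pvIns]
  | cons c rest ih =>
    intro i p acc hi hdrop
    have hlenlt : i - 1 < cs.length := by
      by_contra hge
      rw [List.drop_eq_nil_of_le (by omega)] at hdrop
      exact absurd hdrop (by simp)
    have hlen : cs.length = i + 1 + rest.length := by
      have := congrArg List.length hdrop
      simp at this
      omega
    have hprev : PySem.List.pyGetD cs ((i : Int) - 1) ' ' = p := by
      rw [show ((i : Int) - 1) = ((i - 1 : Nat) : Int) by omega, PySem.List.pyGetD_natCast]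
      rw [List.getD_eq_getElem?_getD, ← List.head?_drop, hdrop]
      rfl
    have hdropi : cs.drop i = c :: rest := by
      have : cs.drop i = (cs.drop (i - 1)).drop 1 := by
        rw [List.drop_drop]; congr 1; omega
      rw [this, hdrop]; rfl
    rw [List.foldl_cons]
    have hstep : pvStepA cs (acc, i) c
        = (acc ++ ((if PySem.Chars.isupper c && p != '_'
              && (!PySem.Chars.isupper p || pvHeadIsLower rest) then ['_'] else [])
            ++ [c]).map PySem.Chars.lowerChar, i + 1) := by
      cases hc : PySem.Chars.isupper c
      · simp [pvStepA, hc, pv_lowerChar_of_not_upper hc, Nat.ne_of_gt hi]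
      · by_cases hpu : p = '_'
        · subst hpu
          simp [pvStepA, hc, hprev, Nat.ne_of_gt hi]
        · cases hp : PySem.Chars.isupper p
          · simp [pvStepA, hc, hprev, hp, hpu, Nat.ne_of_gt hi]
            decide
          · -- previous is uppercase: look at the next character
            cases rest with
            | nil =>
              have : ¬ (i + 1 < cs.length) := by simp [hlen]
              simp [pvStepA, hc, hprev, hp, hpu, Nat.ne_of_gt hi, this, pvHeadIsLower]
            | cons r rs =>
              have hnext : PySem.List.pyGetD cs ((i : Int) + 1) ' ' = r := by
                rw [show ((i : Int) + 1) = ((i + 1 : Nat) : Int) by omega, PySem.List.pyGetD_natCast]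
                rw [List.getD_eq_getElem?_getD, ← List.head?_drop]
                rw [show cs.drop (i + 1) = (cs.drop i).drop 1 by rw [List.drop_drop]]
                rw [hdropi]
                rfl
              have hlt : i + 1 < cs.length := by simp [hlen]
              cases hr : PySem.Chars.islower r <;>
                simp [pvStepA, hc, hprev, hp, hpu, Nat.ne_of_gt hi, hnext, hlt, hr,
                  pvHeadIsLower, pv_lowerChar_underscore]
    rw [hstep]
    rw [ih (i + 1) c _ (by omega) (by simpa using hdropi)]
    rw [show pvIns p (c :: rest)
          = (if PySem.Chars.isupper c && p != '_'
                && (!PySem.Chars.isupper p || pvHeadIsLower rest) then ['_'] else [])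
            ++ c :: pvIns c rest from rfl]
    simp [List.append_assoc]
    omega

-- ===== VERDICT (by name: the statement is the Claim_ definition above) =====
theorem optype_snake_ex_spec : Claim_equal_optype_snake_ex := by
  intro s _
  unfold Spec_optype_snake_ex optype_snake_ex optype_snake_ex_alt
  rw [pv_acr_eq, pv_bnd_eq]
  cases hcs : s.toList with
  | nil => rfl
  | cons c rest =>
    rw [pv_main]
    rw [List.foldl_cons]
    rw [show pvStepA (c :: rest) ([], 0) c = ([PySem.Chars.lowerChar c], 1) by simp [pvStepA]]
    rw [pv_loop (c :: rest) rest 1 c [PySem.Chars.lowerChar c] le_rfl (by simp)]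
    simp [PySem.Chars.lower]
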